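-- pv_equiv track=rewrite | github.com/gorzalniksamuel/Energy-Node-Classifier | scripts/train.py | extract_location_key
-- ===== SOURCE A (Python) =====
-- def extract_location_key(filename: str) -> str:
--     parts = filename.split("_")
--     lat = None
--     lon = None
--     for p in parts:
--         if p.startswith("lat"):
--             lat = p[3:]
--         elif p.startswith("lon"):
--             lon = p[3:]
--     if lat is None or lon is None:
--         return filename
--     return f"{lat}_{lon}"
-- ===== SOURCE B (Python) =====
-- def extract_location_key(filename: str) -> str:
--     lat = _last_field(filename, "lat")
--     lon = _last_field(filename, "lon")
--     if lat is None or lon is None: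
--         return filename
--     return f"{lat}_{lon}"
--
--
-- def _last_field(s: str, prefix: str):
--     # peel the string from the right at the last "_" (no token list is built);
--     # the first token found this way that starts with `prefix` is the last one overall
--     while True:
--         head, sep, tok = s.rpartition("_")
--         if tok.startswith(prefix):
--             return tok[len(prefix):]
--         if not sep:
--             return None
--         s = head
-- ===== Notes on version B (the rewrite author's own statement) =====
-- stated objective: alternative
-- what changed: Instead of tokenizing the filename with split on the underscore separator and scanning the token list forwards with mutable lat/lon overwrite state, B never builds a token list: it peels the string from the right with str.rpartition, returning the first suffix token that carries the prefix (which is the last such token overall), with early exit.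
import Mathlib
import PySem

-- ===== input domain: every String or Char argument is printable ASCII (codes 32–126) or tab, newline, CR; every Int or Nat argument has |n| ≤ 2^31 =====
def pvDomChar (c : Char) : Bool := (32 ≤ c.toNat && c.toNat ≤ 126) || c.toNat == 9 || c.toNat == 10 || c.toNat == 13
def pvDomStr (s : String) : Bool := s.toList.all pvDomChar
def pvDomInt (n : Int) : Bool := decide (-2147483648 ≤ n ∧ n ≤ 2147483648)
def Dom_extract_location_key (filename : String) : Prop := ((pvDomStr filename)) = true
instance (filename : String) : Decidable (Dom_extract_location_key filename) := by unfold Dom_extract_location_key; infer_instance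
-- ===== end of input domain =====

-- B replaces A's tokenize-then-scan (split("_") + forward loop with mutable lat/lon overwrite
-- state) by right-to-left peeling with str.rpartition("_"): no token list is built and the
-- loop exits at the first (i.e. last overall) matching token (alternative; same cost).

-- ===== PORT A =====
-- loop body of A's for-loop: overwrite lat/lon state on each token
def pvStepA (st : Option String × Option String) (p : String) :
    Option String × Option String :=
  if PySem.Str.startswith p "lat" then (some (PySem.Str.slice p (some 3) none), st.2)
  else if PySem.Str.startswith p "lon" then (st.1, some (PySem.Str.slice p (some 3) none))
  else st

def extract_location_key (filename : String) : String :=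
  let parts := (PySem.Str.split? filename "_").getD []   -- sep "_" ≠ "": never none
  let st := parts.foldl pvStepA (none, none)
  match st.1, st.2 with
  | some lat, some lon => lat ++ "_" ++ lon
  | _, _ => filename

-- ===== PORT B =====
-- hand port of s.rpartition("_") on List Char (exact: splits at the LAST '_';
-- none models Python's sep = "" outcome, i.e. no '_' in s)
def pvRPart : List Char → Option (List Char × List Char)
  | [] => none
  | c :: cs =>
    match pvRPart cs with
    | some (h, t) => some (c :: h, t)
    | none => if c = '_' then some ([], cs) else none

-- termination measure of Source B's while loop (cited in decreasing_by)
theorem pvRPart_length : ∀ (l h t : List Char), pvRPart l = some (h, t) → h.length < l.length := by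
  intro l
  induction l with
  | nil => intro h t hr; simp [pvRPart] at hr
  | cons c cs ih =>
    intro h t hr
    simp only [pvRPart] at hr
    cases hcs : pvRPart cs with
    | some p =>
      rw [hcs] at hr
      obtain ⟨ph, pt⟩ := p
      simp only [Option.some.injEq, Prod.mk.injEq] at hr
      have := ih ph pt hcs
      rw [← hr.1]
      simp only [List.length_cons]
      omega
    | none =>
      rw [hcs] at hr
      by_cases hc : c = '_'
      · simp [hc] at hr
        rw [hr.1]
        simp
      · simp [hc] at hr

-- the while loop of Source B's _last_field: peel at the last '_', stop at the first match
def pvLastField (l pre : List Char) : Option (List Char) :=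
  match hr : pvRPart l with
  | some (h, t) =>
    if PySem.Chars.startswith t pre then some (t.drop pre.length)
    else pvLastField h pre
  | none => if PySem.Chars.startswith l pre then some (l.drop pre.length) else none
termination_by l.length
decreasing_by exact pvRPart_length l h t hr

def extract_location_key_alt (filename : String) : String :=
  match pvLastField filename.toList ['l','a','t'] with
  | none => filename
  | some la =>
    match pvLastField filename.toList ['l','o','n'] with
    | none => filename
    | some lo => String.ofList (la ++ '_' :: lo)   -- f"{lat}_{lon}"

-- ===== PRECONDITION & SPEC =====
def Spec_extract_location_key (filename : String) (out : String) : Prop := out = extract_location_key_alt filename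
instance (filename : String) (out : String) : Decidable (Spec_extract_location_key filename out) := by unfold Spec_extract_location_key; infer_instance

-- ===== CLAIM (what is proved, stated in full; the proofs are below) =====
def Claim_equal_extract_location_key : Prop := ∀ (filename : String), Dom_extract_location_key filename → Spec_extract_location_key filename (extract_location_key filename)

-- ===== LEMMAS AND PROOFS =====

-- a token cannot start with both "lat" and "lon"
theorem pv_not_both (l : List Char) (h : PySem.Chars.startswith l ['l', 'a', 't'] = true) :
    PySem.Chars.startswith l ['l', 'o', 'n'] = false := by
  by_contra hc
  rw [Bool.not_eq_false] at hc
  rw [PySem.Chars.startswith_iff] at h hc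
  obtain ⟨t, ht⟩ := h
  obtain ⟨u, hu⟩ := hc
  rw [← ht] at hu
  simp at hu

-- A's fold equals the last-match characterisation (first match in the reversed list)
theorem pv_fold_eq (parts : List String) (a b : Option String) :
    parts.foldl pvStepA (a, b) =
      (((parts.reverse.find? (fun p => PySem.Str.startswith p "lat")).map
          (fun p => PySem.Str.slice p (some 3) none)).or a,
       ((parts.reverse.find? (fun p => PySem.Str.startswith p "lon")).map
          (fun p => PySem.Str.slice p (some 3) none)).or b) := by
  induction parts generalizing a b with
  | nil => simp
  | cons p rest ih =>
    simp only [List.foldl_cons, List.reverse_cons, List.find?_append, Option.map_or,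
      Option.or_assoc, ih]
    by_cases hlat : PySem.Chars.startswith p.toList ['l', 'a', 't'] = true
    · simp [pvStepA, PySem.Str.startswith_eq, hlat, pv_not_both p.toList hlat, List.find?]
    · by_cases hlon : PySem.Chars.startswith p.toList ['l', 'o', 'n'] = true
      · simp [pvStepA, PySem.Str.startswith_eq, hlat, hlon, List.find?]
      · simp [pvStepA, PySem.Str.startswith_eq, hlat, hlon, List.find?]

-- proof-side reference splitter on '_' (structural recursion)
def pvTokens : List Char → List (List Char)
  | [] => [[]]
  | c :: rest =>
    if c = '_' then [] :: pvTokens rest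
    else
      match pvTokens rest with
      | [] => [[c]]
      | x :: xs => (c :: x) :: xs

theorem pvTokens_ne_nil (l : List Char) : pvTokens l ≠ [] := by
  cases l with
  | nil => simp [pvTokens]
  | cons c rest =>
    simp only [pvTokens]
    split_ifs
    · simp
    · cases pvTokens rest <;> simp

def pvConsHead (p : List Char) : List (List Char) → List (List Char)
  | [] => []
  | x :: xs => (p ++ x) :: xs

theorem pvGo_eq (fuel : Nat) :
    ∀ (l cur : List Char) (acc : List (List Char)), l.length ≤ fuel →
      PySem.Chars.splitOn.go ['_'] fuel l cur acc =
        acc.reverse ++ pvConsHead cur.reverse (pvTokens l) := by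
  induction fuel with
  | zero =>
    intro l cur acc hl
    have : l = [] := by cases l <;> simp_all
    subst this
    simp [PySem.Chars.splitOn.go, pvTokens, pvConsHead]
  | succ fuel ih =>
    intro l cur acc hl
    cases l with
    | nil => simp [PySem.Chars.splitOn.go, pvTokens, pvConsHead]
    | cons c rest =>
      simp only [PySem.Chars.splitOn.go]
      by_cases hc : c = '_'
      · subst hc
        have hpre : ['_'].isPrefixOf ('_' :: rest) = true := by simp [List.isPrefixOf]
        rw [if_pos hpre]
        simp only [List.length_cons] at hl
        simp only [List.length_cons, List.length_nil, List.drop_succ_cons, List.drop_zero]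
        rw [ih rest [] _ (by omega)]
        cases htr : pvTokens rest with
        | nil => exact absurd htr (pvTokens_ne_nil rest)
        | cons x xs => simp [pvTokens, pvConsHead, htr]
      · have hpre : ['_'].isPrefixOf (c :: rest) = false := by
          simp [List.isPrefixOf]
          exact fun h => absurd h.symm hc
        rw [if_neg (by simp [hpre])]
        simp only [List.length_cons] at hl
        rw [ih rest (c :: cur) acc (by omega)]
        cases htr : pvTokens rest with
        | nil => exact absurd htr (pvTokens_ne_nil rest)
        | cons x xs => simp [pvTokens, pvConsHead, htr, hc]

theorem pvSplitOn_eq (l : List Char) : PySem.Chars.splitOn l ['_'] = pvTokens l := by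
  rw [PySem.Chars.splitOn, pvGo_eq (l.length + 1) l [] [] (by omega)]
  cases htl : pvTokens l with
  | nil => exact absurd htl (pvTokens_ne_nil l)
  | cons x xs => simp [pvConsHead]

theorem pvTokens_no_sep (l : List Char) (h : '_' ∉ l) : pvTokens l = [l] := by
  induction l with
  | nil => simp [pvTokens]
  | cons c rest ih =>
    simp only [List.mem_cons, not_or] at h
    simp [pvTokens, Ne.symm h.1, ih h.2]

theorem pvTokens_append (h t : List Char) (ht : '_' ∉ t) :
    pvTokens (h ++ '_' :: t) = pvTokens h ++ [t] := by
  induction h with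
  | nil => simp [pvTokens, pvTokens_no_sep t ht]
  | cons c rest ih =>
    by_cases hc : c = '_'
    · simp [pvTokens, hc, ih]
    · simp only [List.cons_append, pvTokens, hc, if_false]
      rw [ih]
      cases htr : pvTokens rest with
      | nil => exact absurd htr (pvTokens_ne_nil rest)
      | cons x xs => simp

theorem pvRPart_none (l : List Char) (hr : pvRPart l = none) : '_' ∉ l := by
  induction l with
  | nil => simp
  | cons c cs ih =>
    simp only [pvRPart] at hr
    cases hcs : pvRPart cs with
    | some p => rw [hcs] at hr; cases p; simp at hr
    | none =>
      rw [hcs] at hr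
      by_cases hc : c = '_'
      · simp [hc] at hr
      · simp [Ne.symm hc, ih hcs]

theorem pvRPart_some (l h t : List Char) (hr : pvRPart l = some (h, t)) :
    l = h ++ '_' :: t ∧ '_' ∉ t := by
  induction l generalizing h t with
  | nil => simp [pvRPart] at hr
  | cons c cs ih =>
    simp only [pvRPart] at hr
    cases hcs : pvRPart cs with
    | some p =>
      rw [hcs] at hr
      obtain ⟨ph, pt⟩ := p
      simp only [Option.some.injEq, Prod.mk.injEq] at hr
      obtain ⟨h1, h2⟩ := hr
      obtain ⟨hl, hn⟩ := ih ph pt hcs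
      subst h2
      rw [← h1]
      simp [hl, hn]
    | none =>
      rw [hcs] at hr
      by_cases hc : c = '_'
      · simp [hc] at hr
        obtain ⟨h1, h2⟩ := hr
        subst h1
        subst h2
        exact ⟨by simp [hc], pvRPart_none _ hcs⟩
      · simp [hc] at hr

-- unfolding equations of pvLastField, resolved against a known pvRPart result
theorem pvLastField_some (l pre h t : List Char) (hr : pvRPart l = some (h, t)) :
    pvLastField l pre =
      if PySem.Chars.startswith t pre then some (t.drop pre.length) else pvLastField h pre := by
  rw [pvLastField.eq_def]
  split
  · next h' t' heq =>
    rw [hr] at heq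
    simp only [Option.some.injEq, Prod.mk.injEq] at heq
    rw [heq.1, heq.2]
  · next heq => rw [hr] at heq; simp at heq

theorem pvLastField_none (l pre : List Char) (hr : pvRPart l = none) :
    pvLastField l pre =
      if PySem.Chars.startswith l pre then some (l.drop pre.length) else none := by
  rw [pvLastField.eq_def]
  split
  · next h' t' heq => rw [hr] at heq; simp at heq
  · rfl

theorem pvLastField_eq (l pre : List Char) :
    pvLastField l pre =
      ((pvTokens l).reverse.find? (fun p => PySem.Chars.startswith p pre)).map
        (fun p => p.drop pre.length) := by
  induction l using pvLastField.induct pre with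
  | case1 x h t hr hsw =>
    obtain ⟨hl, hn⟩ := pvRPart_some x h t hr
    rw [pvLastField_some x pre h t hr, hl, pvTokens_append h t hn]
    simp [hsw]
  | case2 x h t hr hsw ih =>
    obtain ⟨hl, hn⟩ := pvRPart_some x h t hr
    rw [pvLastField_some x pre h t hr, hl, pvTokens_append h t hn, ih]
    simp [hsw]
  | case3 x hr hsw =>
    rw [pvLastField_none x pre hr, pvTokens_no_sep x (pvRPart_none x hr)]
    simp [hsw]
  | case4 x hr hsw =>
    rw [pvLastField_none x pre hr, pvTokens_no_sep x (pvRPart_none x hr)]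
    simp [hsw]

-- the char-level last field equals A's string-level last match
theorem pvLastField_str (f preS : String) (pre : List Char) (ss : List String)
    (hs : PySem.Str.split? f "_" = some ss) (hpre : preS.toList = pre) (hlen : pre.length = 3) :
    pvLastField f.toList pre =
      ((ss.reverse.find? (fun p => PySem.Str.startswith p preS)).map
        (fun p => PySem.Str.slice p (some 3) none)).map String.toList := by
  have hmap := PySem.Str.split?_map f "_"
  rw [hs] at hmap
  simp [PySem.Chars.split?, pvSplitOn_eq] at hmap
  rw [pvLastField_eq, ← hmap, ← List.map_reverse, List.find?_map, Option.map_map, Option.map_map]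
  have hP : ((fun p => PySem.Chars.startswith p pre) ∘ String.toList) =
      (fun p : String => PySem.Str.startswith p preS) := by
    funext p
    simp [PySem.Str.startswith_eq, hpre]
  rw [hP]
  congr 1
  funext p
  simp only [Function.comp_apply, PySem.Str.toList_slice, PySem.Chars.slice_eq_listSlice]
  rw [PySem.List.slice_from p.toList (by norm_num : (0:Int) ≤ 3), hlen]
  rfl

-- glue the two results: a String equals the ofList of its pieces
theorem pv_join_eq (s t : String) :
    s ++ "_" ++ t = String.ofList (s.toList ++ '_' :: t.toList) := by
  apply String.toList_inj.mp
  simp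

-- ===== VERDICT (by name: the statement is the Claim_ definition above) =====
theorem extract_location_key_spec : Claim_equal_extract_location_key := by
  intro f _
  unfold Spec_extract_location_key extract_location_key extract_location_key_alt
  cases hs : PySem.Str.split? f "_" with
  | none =>
    have := PySem.Str.split?_map f "_"
    rw [hs] at this
    simp [PySem.Chars.split?] at this
  | some ss =>
    simp only [Option.getD_some, pv_fold_eq, Option.or_none]
    rw [pvLastField_str f "lat" ['l','a','t'] ss hs rfl rfl,
      pvLastField_str f "lon" ['l','o','n'] ss hs rfl rfl]
    rcases (ss.reverse.find? (fun p => PySem.Str.startswith p "lat")).map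
        (fun p => PySem.Str.slice p (some 3) none) with _ | la <;>
      rcases (ss.reverse.find? (fun p => PySem.Str.startswith p "lon")).map
        (fun p => PySem.Str.slice p (some 3) none) with _ | lo <;>
      simp [pv_join_eq]
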